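-- pv_equiv track=rewrite | github.com/1ou2/leetcode | p68.py | justifyLine
-- ===== SOURCE A (Python) =====
-- def justifyLine(words,maxWidth,islastline=False):
--     wl=0
--     if len(words) == 1:
--         return words[0].ljust(maxWidth)
--
--     # last line is always left justified
--     if islastline:
--         line = ""
--         for w in words[:-1]:
--             line = line + w + " "
--         line = line + words[-1]
--         return line.ljust(maxWidth)
--
--     # check length of all words
--     for word in words:
--         wl = wl+len(word)
--     # number of spaces between words
--     spacesize = (maxWidth - wl) // (len(words)-1)
--     # but spaces are not evenly distributed
--     # one extraspace added for the first spaces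
--     extraspaces = (maxWidth - wl) % (len(words)-1)
--     line = ""
--     for i,w in enumerate(words[:-1]):
--         line = line + w + " "*spacesize
--         if i < extraspaces:
--             line = line + " "
--     line = line + words[-1]
--     return line
-- ===== SOURCE B (Python) =====
-- def justifyLine(words, maxWidth, islastline=False):
--     if islastline or len(words) == 1:
--         return " ".join(words).ljust(maxWidth)
--     gaps = len(words) - 1
--     total = maxWidth - sum(len(w) for w in words)
--     padded = list(words)
--     for i in range(total):
--         padded[i % gaps] += " "
--     return "".join(padded)
-- ===== Notes on version B (the rewrite author's own statement) =====
-- stated objective: alternative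
-- what changed: B replaces A's precomputed spacesize/extraspaces divmod arithmetic with an incremental round-robin distribution: it copies the word list and, once per missing-width space, appends one space to entry i % gaps, then joins the copy once; the single-word and last-line branches become ' '.join(words).ljust(maxWidth).
-- intended difference: On full-justify calls where the words alone already exceed maxWidth and the deficit is not a multiple of the gap count, A still inserts deficit%gaps stray single spaces into the first gaps (leftover of its modulo arithmetic), while B returns the words concatenated with no padding, the natural output when there are no spaces to distribute. — e.g. on justifyLine(["a", "b", "c"], 2, false): A returns "a bc", B returns "abc"
import Mathlib
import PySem

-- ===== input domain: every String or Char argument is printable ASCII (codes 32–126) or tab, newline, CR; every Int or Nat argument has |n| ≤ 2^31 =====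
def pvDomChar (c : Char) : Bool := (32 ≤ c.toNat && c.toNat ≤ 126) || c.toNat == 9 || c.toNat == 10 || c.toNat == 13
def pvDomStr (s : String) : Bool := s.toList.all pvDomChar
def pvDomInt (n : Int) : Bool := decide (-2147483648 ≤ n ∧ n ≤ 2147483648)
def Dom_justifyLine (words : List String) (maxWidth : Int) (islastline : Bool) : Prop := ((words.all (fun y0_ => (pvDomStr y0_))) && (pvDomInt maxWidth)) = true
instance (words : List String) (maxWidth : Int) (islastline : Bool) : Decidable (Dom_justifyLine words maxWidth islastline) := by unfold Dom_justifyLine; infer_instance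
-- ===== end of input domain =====

-- B distributes the padding incrementally round-robin (one space at a time onto gap i % gaps) over a
-- copy of the word list instead of A's precomputed spacesize/extraspaces per-word arithmetic
-- (objective: alternative decomposition, no speed claim).

-- s.ljust(w) with the space fill character (Python clamps a non-positive pad to nothing)
def pvLjust (s : String) (w : Int) : String :=
  String.ofList (s.toList ++ List.replicate (w - (s.toList.length : Int)).toNat ' ')

-- ===== PORT A =====
def justifyLine (words : List String) (maxWidth : Int) (islastline : Bool) : String :=
  if words.length = 1 then
    pvLjust (words.headD "") maxWidth
  else if islastline then
    let line := (PySem.List.slice words none (some (-1))).foldl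
        (fun line w => line ++ w.toList ++ [' ']) ([] : List Char)
    let line := line ++ ((PySem.List.pyGet? words (-1)).getD "").toList
    pvLjust (String.ofList line) maxWidth
  else
    let wl := words.foldl (fun wl word => wl + PySem.Str.len word) (0 : Int)
    let spacesize := PySem.Int.floordiv (maxWidth - wl) ((words.length : Int) - 1)
    let extraspaces := PySem.Int.mod (maxWidth - wl) ((words.length : Int) - 1)
    let line := (PySem.List.enumerate (PySem.List.slice words none (some (-1)))).foldl
        (fun line iw =>
          let line := line ++ iw.2.toList ++ List.replicate spacesize.toNat ' '
          if iw.1 < extraspaces then line ++ [' '] else line) ([] : List Char)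
    String.ofList (line ++ ((PySem.List.pyGet? words (-1)).getD "").toList)

-- ===== PORT B =====
-- strings are kept as List Char ("padded[j] += ' '" appends a char; the final "".join flattens)
def justifyLine_alt (words : List String) (maxWidth : Int) (islastline : Bool) : String :=
  if islastline || words.length == 1 then
    pvLjust (PySem.Str.join " " words) maxWidth
  else
    let gaps : Int := (words.length : Int) - 1
    let total := maxWidth - (words.map PySem.Str.len).sum
    let padded := (PySem.List.pyRange 0 total 1).foldl
        (fun c i =>
          let j := PySem.Int.mod i gaps
          PySem.List.pySetD c j (PySem.List.pyGetD c j [] ++ [' ']))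
        (words.map String.toList)
    String.ofList padded.flatten

-- ===== PRECONDITION & SPEC =====
-- Pre_ excludes only the empty word list, on which A raises IndexError (words[-1]).
def Pre_justifyLine (words : List String) (maxWidth : Int) (islastline : Bool) : Prop := words ≠ []
instance (words : List String) (maxWidth : Int) (islastline : Bool) : Decidable (Pre_justifyLine words maxWidth islastline) := by unfold Pre_justifyLine; infer_instance
def pvWitness_justifyLine : List String × Int × Bool := (["ab", "c", "d"], 11, false)

-- On full-justify calls where the words alone already exceed maxWidth and the deficit is not a multiple
-- of the gap count, A still inserts deficit%gaps stray single spaces into the first gaps (leftover of its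
-- modulo arithmetic), while B returns the words concatenated with no padding, the natural output when
-- there are no spaces to distribute.
def D_justifyLine (words : List String) (maxWidth : Int) (islastline : Bool) : Prop :=
  islastline = false ∧ 2 ≤ words.length ∧
  maxWidth < words.foldr (fun w n => n + (w.toList.length : Int)) 0 ∧
  ¬ ((words.length : Int) - 1) ∣ (words.foldr (fun w n => n + (w.toList.length : Int)) 0 - maxWidth)
instance (words : List String) (maxWidth : Int) (islastline : Bool) : Decidable (D_justifyLine words maxWidth islastline) := by unfold D_justifyLine; infer_instance

def Spec_justifyLine (words : List String) (maxWidth : Int) (islastline : Bool) (out : String) : Prop := ¬ D_justifyLine words maxWidth islastline → out = justifyLine_alt words maxWidth islastline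
instance (words : List String) (maxWidth : Int) (islastline : Bool) (out : String) : Decidable (Spec_justifyLine words maxWidth islastline out) := by unfold Spec_justifyLine; infer_instance

def pvDiffWitness_justifyLine : List String × Int × Bool := (["a", "b", "c"], 2, false)
def pvDiffWitnessOut_justifyLine : String × String := ("a bc", "abc")

-- ===== CLAIM (what is proved, stated in full; the proofs are below) =====
def Claim_unchanged_justifyLine : Prop := ∀ (words : List String) (maxWidth : Int) (islastline : Bool), Dom_justifyLine words maxWidth islastline → Pre_justifyLine words maxWidth islastline → Spec_justifyLine words maxWidth islastline (justifyLine words maxWidth islastline)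
def Claim_changed_justifyLine : Prop := Dom_justifyLine (pvDiffWitness_justifyLine.1) (pvDiffWitness_justifyLine.2.1) (pvDiffWitness_justifyLine.2.2) ∧ Pre_justifyLine (pvDiffWitness_justifyLine.1) (pvDiffWitness_justifyLine.2.1) (pvDiffWitness_justifyLine.2.2) ∧ D_justifyLine (pvDiffWitness_justifyLine.1) (pvDiffWitness_justifyLine.2.1) (pvDiffWitness_justifyLine.2.2) ∧ justifyLine (pvDiffWitness_justifyLine.1) (pvDiffWitness_justifyLine.2.1) (pvDiffWitness_justifyLine.2.2) = pvDiffWitnessOut_justifyLine.1 ∧ justifyLine_alt (pvDiffWitness_justifyLine.1) (pvDiffWitness_justifyLine.2.1) (pvDiffWitness_justifyLine.2.2) = pvDiffWitnessOut_justifyLine.2 ∧ pvDiffWitnessOut_justifyLine.1 ≠ pvDiffWitnessOut_justifyLine.2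

def Claim_exact_justifyLine : Prop := ∀ (words : List String) (maxWidth : Int) (islastline : Bool), Dom_justifyLine words maxWidth islastline → Pre_justifyLine words maxWidth islastline → D_justifyLine words maxWidth islastline → justifyLine words maxWidth islastline ≠ justifyLine_alt words maxWidth islastline

-- ===== LEMMAS AND PROOFS =====

-- per-gap space count after t round-robin steps over g gaps
def pvCnt (g : Nat) : Nat → Nat → Nat
  | 0, _ => 0
  | t + 1, j => pvCnt g t j + (if j = t % g then 1 else 0)

theorem pvLjust_congr (s t : String) (w : Int) (h : s.toList = t.toList) : pvLjust s w = pvLjust t w := by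
  unfold pvLjust; rw [h]

theorem pvGet_neg_one {α : Type} (xs : List α) : PySem.List.pyGet? xs (-1) = xs.getLast? := by
  rcases xs with _ | ⟨x, t⟩
  · simp [PySem.List.pyGet?, PySem.List.pyIdx?]
  · simp [PySem.List.pyGet?, PySem.List.pyIdx?, List.getLast?_eq_getElem?]

theorem pvJoin_eq : ∀ (ws : List String) (hw : ws ≠ []) (acc : List Char),
    ws.dropLast.foldl (fun l w => l ++ w.toList ++ [' ']) acc ++ ((ws.getLast hw).toList) =
    acc ++ PySem.Chars.join [' '] (ws.map String.toList)
  | [x], _, acc => by simp [PySem.Chars.join_singleton]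
  | (x :: y :: rest), _, acc => by
      have ih := pvJoin_eq (y :: rest) (by simp) (acc ++ x.toList ++ [' '])
      simp only [List.dropLast_cons_of_ne_nil (by simp : (y :: rest) ≠ ([] : List String)), List.foldl_cons]
      rw [List.getLast_cons (by simp), ih]
      simp only [List.map_cons]
      rw [PySem.Chars.join_cons_cons]
      simp

theorem pvMod_bounds (a b : Int) (h : 0 < b) : 0 ≤ PySem.Int.mod a b ∧ PySem.Int.mod a b < b := by
  unfold PySem.Int.mod
  rw [Int.fmod_eq_emod]
  have hd : 0 ≤ b ∨ b ∣ a := Or.inl (le_of_lt h)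
  simp [hd]
  exact ⟨Int.emod_nonneg a (by omega), Int.emod_lt_of_pos a h⟩

theorem pvCnt_last (g t j : Nat) (hg : 0 < g) (hj : g ≤ j) : pvCnt g t j = 0 := by
  induction t with
  | zero => rfl
  | succ t ih =>
      have : ¬ (j = t % g) := by have := Nat.mod_lt t hg; omega
      simp [pvCnt, ih, this]

theorem pvCnt_eq (g : Nat) (hg : 0 < g) : ∀ (t j : Nat), j < g →
    pvCnt g t j = t / g + (if j < t % g then 1 else 0) := by
  intro t
  induction t with
  | zero => intro j hj; simp [pvCnt]
  | succ t ih =>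
      intro j hj
      have hm := Nat.mod_lt t hg
      have hdm := Nat.div_add_mod t g
      by_cases h : t % g + 1 = g
      · have hmulg : g * (t / g + 1) = g * (t / g) + g := by ring
        have h1 : t + 1 = g * (t / g + 1) := by omega
        have hdiv : (t + 1) / g = t / g + 1 := by
          rw [h1, Nat.mul_div_cancel_left _ hg]
        have hmod : (t + 1) % g = 0 := by
          rw [h1, Nat.mul_mod_right]
        rw [pvCnt, ih j hj, hdiv, hmod]
        split_ifs <;> omega
      · have h2 : t + 1 = t % g + 1 + g * (t / g) := by omega
        have hdiv : (t + 1) / g = t / g := by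
          rw [h2, Nat.add_mul_div_left _ _ hg, Nat.div_eq_of_lt (by omega)]
          omega
        have hmod : (t + 1) % g = t % g + 1 := by
          rw [h2, Nat.add_mul_mod_self_left, Nat.mod_eq_of_lt (by omega)]
        rw [pvCnt, ih j hj, hdiv, hmod]
        split_ifs <;> omega

-- round-robin fold characterization: each slot j has received pvCnt g t j spaces
theorem pvRR (g : Nat) (hg : 0 < g) : ∀ (t : Nat) (c : List (List Char)), g < c.length →
    (PySem.List.pyRange 0 (t : Int) 1).foldl
      (fun c i =>
        let j := PySem.Int.mod i (g : Int)
        PySem.List.pySetD c j (PySem.List.pyGetD c j [] ++ [' '])) c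
    = c.mapIdx (fun j l => l ++ List.replicate (pvCnt g t j) ' ') := by
  intro t
  induction t with
  | zero =>
      intro c hc
      rw [PySem.List.pyRange_one_eq_nil (by omega)]
      simp only [List.foldl_nil]
      apply List.ext_getElem (by simp)
      intro i h1 h2
      simp [pvCnt]
  | succ t ih =>
      intro c hc
      have hcast : ((t + 1 : Nat) : Int) = (t : Int) + 1 := by push_cast; ring
      rw [hcast, PySem.List.pyRange_one_succ_right (by omega), List.foldl_append, ih c hc]
      simp only [List.foldl_cons, List.foldl_nil]
      have hmod : PySem.Int.mod (t : Int) (g : Int) = ((t % g : Nat) : Int) :=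
        PySem.Int.mod_natCast t g
      have hlt : t % g < c.length := lt_trans (Nat.mod_lt t hg) hc
      rw [hmod, PySem.List.pySetD_natCast, PySem.List.pyGetD_natCast,
        List.getD_eq_getElem _ _ (by simp [hlt])]
      apply List.ext_getElem (by simp)
      intro i h1 h2
      rw [List.getElem_set]
      by_cases hi : t % g = i
      · subst hi
        have hstep : pvCnt g (t + 1) (t % g) = pvCnt g t (t % g) + 1 := by simp [pvCnt]
        simp [List.getElem_mapIdx, hstep, List.replicate_succ']
      · have hne : ¬ (i = t % g) := fun h => hi h.symm
        have hsame : pvCnt g (t + 1) i = pvCnt g t i := by simp [pvCnt, hne]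
        simp [List.getElem_mapIdx, hsame, hi]

-- flatten of an index-padded word list equals the enumerate flatMap, given pointwise agreement
theorem pvFlattenEnum (P : Nat → List Char) (Q : Int → List Char) :
    ∀ (l : List String) (s : Nat), (∀ j, j < l.length → P (s + j) = Q ((s : Int) + (j : Int))) →
    ((l.map String.toList).mapIdx (fun j c => c ++ P (s + j))).flatten
      = (PySem.List.enumerate l (s : Int)).flatMap (fun iw => iw.2.toList ++ Q iw.1)
  | [], s, _ => by simp [PySem.List.enumerate_nil]
  | (x :: l), s, h => by
      have h0 := h 0 (by simp)
      have ih := pvFlattenEnum P Q l (s + 1) (by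
        intro j hj
        have := h (j + 1) (by simpa using Nat.succ_lt_succ hj)
        push_cast at this ⊢
        convert this using 2 <;> ring)
      simp only [List.map_cons, List.mapIdx_cons, List.flatten_cons, PySem.List.enumerate_cons,
        List.flatMap_cons]
      have hfun : (List.mapIdx (fun i c => c ++ P (s + (i + 1))) (l.map String.toList))
          = (List.mapIdx (fun j c => c ++ P (s + 1 + j)) (l.map String.toList)) := by
        congr 1; funext i c; congr 2; omega
      rw [hfun]
      have hcast : ((s : Int) + 1) = ((s + 1 : Nat) : Int) := by push_cast; ring
      rw [hcast, ih]
      simp at h0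
      simp only [Nat.add_zero]
      rw [h0]

theorem pvSumLen : ∀ (ws : List String),
    ws.foldr (fun w n => n + (w.toList.length : Int)) 0 = (ws.map PySem.Str.len).sum := by
  intro ws
  induction ws with
  | nil => simp
  | cons x l ih =>
      simp only [List.foldr_cons, List.map_cons, List.sum_cons, PySem.Str.len_eq, ih]
      ring

theorem pvMain : ∀ (words : List String) (maxWidth : Int) (islastline : Bool),
    words ≠ [] → ¬ D_justifyLine words maxWidth islastline →
    justifyLine words maxWidth islastline = justifyLine_alt words maxWidth islastline := by
  intro words mw il hpre hD
  by_cases h1 : words.length = 1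
  · obtain ⟨w, rfl⟩ := List.length_eq_one_iff.mp h1
    simp only [justifyLine, justifyLine_alt, if_pos h1]
    rw [if_pos (by simp : ((il || [w].length == 1) = true))]
    apply pvLjust_congr
    rw [PySem.Str.toList_join]
    simp [PySem.Chars.join_singleton]
  · by_cases h2 : il = true
    · subst h2
      simp only [justifyLine, justifyLine_alt, if_neg h1, Bool.true_or, if_pos rfl]
      apply pvLjust_congr
      simp only [String.toList_ofList, PySem.List.slice_to_neg_one, pvGet_neg_one]
      rw [PySem.Str.toList_join, List.getLast?_eq_some_getLast hpre]
      have := pvJoin_eq words hpre []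
      simp only [List.nil_append] at this
      simpa using this
    · have hil : il = false := by simp_all
      subst hil
      have hlen2 : 2 ≤ words.length := by
        rcases words with _ | ⟨x, _ | ⟨y, t⟩⟩ <;> simp_all
      have hbeq : (words.length == 1) = false := by simp [h1]
      simp only [justifyLine, justifyLine_alt, if_neg h1, hbeq, Bool.false_or,
        Bool.false_eq_true, if_neg (not_false)]
      have hsum : words.foldl (fun a w => a + PySem.Str.len w) 0 = (words.map PySem.Str.len).sum := by
        simpa using PySem.List.foldl_add words PySem.Str.len 0
      rw [hsum]
      -- names
      set gN : Nat := words.length - 1 with hgN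
      have hg : 0 < gN := by omega
      have hgI : ((words.length : Int) - 1) = (gN : Int) := by
        rw [hgN]; omega
      set total : Int := mw - (words.map PySem.Str.len).sum with htdef
      set q : Int := PySem.Int.floordiv total ((words.length : Int) - 1) with hqdef
      set r : Int := PySem.Int.mod total ((words.length : Int) - 1) with hrdef
      set t : Nat := total.toNat with htN
      have hr := pvMod_bounds total ((words.length : Int) - 1) (by omega)
      -- ¬D in this branch: total ≥ 0 ∨ r = 0
      have hws := pvSumLen words
      have hcase : 0 ≤ total ∨ r = 0 := by
        by_contra hcon
        push_neg at hcon
        refine hD ⟨rfl, hlen2, by omega, ?_⟩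
        intro hdvd
        apply hcon.2
        have h3 : ((words.length : Int) - 1) ∣ (mw - words.foldr (fun w n => n + (w.toList.length : Int)) 0) := by
          have := (dvd_neg (α := Int)).mpr hdvd
          simpa [neg_sub] using this
        rw [hrdef, PySem.Int.mod_eq_zero_iff_dvd, htdef, ← hws]
        exact h3
      -- B's range is range(t) (empty when total < 0)
      have hrange : PySem.List.pyRange 0 total 1 = PySem.List.pyRange 0 (t : Int) 1 := by
        by_cases h : 0 ≤ total
        · rw [htN, Int.toNat_of_nonneg h]
        · rw [PySem.List.pyRange_one_eq_nil (by omega),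
            PySem.List.pyRange_one_eq_nil (by omega)]
      rw [hrange, hgI, pvRR gN hg t (words.map String.toList) (by simp; omega)]
      -- A's fold as a flatMap
      have hA : (PySem.List.enumerate (PySem.List.slice words none (some (-1))) 0).foldl
          (fun line iw =>
            let line := line ++ iw.2.toList ++ List.replicate q.toNat ' '
            if iw.1 < r then line ++ [' '] else line) ([] : List Char)
          = (PySem.List.enumerate words.dropLast 0).flatMap
              (fun iw => iw.2.toList ++ List.replicate q.toNat ' ' ++ (if iw.1 < r then [' '] else [])) := by
        rw [PySem.List.slice_to_neg_one]
        rw [PySem.List.foldl_congr_mem _ _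
          (fun line iw => line ++ (iw.2.toList ++ List.replicate q.toNat ' ' ++ (if iw.1 < r then [' '] else []))) _
          (by intro acc x _; dsimp only; split_ifs <;> simp)]
        simpa using PySem.List.foldl_append_eq_flatMap
          (fun iw : Int × String => iw.2.toList ++ List.replicate q.toNat ' ' ++ (if iw.1 < r then [' '] else [])) _ []
      rw [hA]
      -- pointwise agreement of the per-gap padding
      have hpoint : ∀ j, j < gN →
          List.replicate (pvCnt gN t j) ' '
            = List.replicate q.toNat ' ' ++ (if (j : Int) < r then [' '] else []) := by
        intro j hj
        by_cases hpos : 0 ≤ total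
        · have htI : (t : Int) = total := by rw [htN]; omega
          have hq : q = ((t / gN : Nat) : Int) := by
            rw [hqdef, hgI, ← htI]; exact PySem.Int.floordiv_natCast t gN
          have hrn : r = ((t % gN : Nat) : Int) := by
            rw [hrdef, hgI, ← htI]; exact PySem.Int.mod_natCast t gN
          rw [pvCnt_eq gN hg t j hj, hq, hrn]
          rw [Int.toNat_natCast]
          by_cases hc : j < t % gN
          · rw [if_pos hc, if_pos (by exact_mod_cast hc), List.replicate_succ'.symm]
          · rw [if_neg hc, if_neg (by exact_mod_cast hc)]
            simp
        · have hneg : total < 0 := by omega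
          have hzero : r = 0 := hcase.resolve_left (by omega)
          have ht0 : t = 0 := by rw [htN]; omega
          have hq0 : q.toNat = 0 := by
            have : q < 0 := by
              rw [hqdef]
              exact (PySem.Int.floordiv_lt_iff_lt_mul (by omega)).mpr (by omega)
            omega
          rw [ht0, hq0, hzero]
          have : ¬ ((j : Int) < 0) := by omega
          simp [pvCnt, this]
      -- split words into dropLast ++ [last]
      have hsplit : words = words.dropLast ++ [words.getLast hpre] :=
        (List.dropLast_append_getLast hpre).symm
      have hlend : words.dropLast.length = gN := by simp [hgN]
      congr 1
      symm
      calc (List.mapIdx (fun j l => l ++ List.replicate (pvCnt gN t j) ' ') (words.map String.toList)).flatten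
          = (List.mapIdx (fun j l => l ++ List.replicate (pvCnt gN t j) ' ')
              ((words.dropLast.map String.toList) ++ [(words.getLast hpre).toList])).flatten := by
            conv_lhs => rw [hsplit]
            simp
        _ = ((words.dropLast.map String.toList).mapIdx (fun j c => c ++ List.replicate (pvCnt gN t j) ' ')).flatten
              ++ ((words.getLast hpre).toList ++ List.replicate (pvCnt gN t (0 + words.dropLast.length)) ' ') := by
            rw [List.mapIdx_append]
            simp
        _ = ((words.dropLast.map String.toList).mapIdx (fun j c => c ++ List.replicate (pvCnt gN t j) ' ')).flatten
              ++ (words.getLast hpre).toList := by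
            rw [pvCnt_last gN t _ hg (by rw [hlend]; omega)]
            simp
        _ = (PySem.List.enumerate words.dropLast 0).flatMap
              (fun iw => iw.2.toList ++ List.replicate q.toNat ' ' ++ (if iw.1 < r then [' '] else []))
              ++ (words.getLast hpre).toList := by
            congr 1
            have := pvFlattenEnum (fun j => List.replicate (pvCnt gN t j) ' ')
              (fun i => List.replicate q.toNat ' ' ++ (if i < r then [' '] else []))
              words.dropLast 0
              (by
                intro j hj
                simp only [Nat.zero_add, Int.natCast_zero, Int.zero_add]
                exact hpoint j (by omega))
            simp only [Nat.zero_add, Int.natCast_zero] at this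
            rw [this]
            simp [List.append_assoc]
        _ = (PySem.List.enumerate words.dropLast 0).flatMap
              (fun iw => iw.2.toList ++ List.replicate q.toNat ' ' ++ (if iw.1 < r then [' '] else []))
              ++ ((PySem.List.pyGet? words (-1)).getD "").toList := by
            rw [pvGet_neg_one, List.getLast?_eq_some_getLast hpre]
            rfl

-- length of the enumerate flatMap: the words' letters plus the per-gap padding lengths
theorem pvFlatLen (Q : Int → List Char) : ∀ (l : List String) (s : Int),
    ((PySem.List.enumerate l s).flatMap (fun iw => iw.2.toList ++ Q iw.1)).length
      = ((l.map String.toList).flatten).length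
        + ((PySem.List.enumerate l s).map (fun iw => (Q iw.1).length)).sum
  | [], s => by simp [PySem.List.enumerate_nil]
  | (x :: l), s => by
      have ih := pvFlatLen Q l (s + 1)
      simp only [PySem.List.enumerate_cons, List.flatMap_cons, List.map_cons, List.flatten_cons,
        List.sum_cons, List.length_append, ih]
      omega

theorem pvTight : ∀ (words : List String) (mw : Int) (il : Bool),
    words ≠ [] → D_justifyLine words mw il →
    justifyLine words mw il ≠ justifyLine_alt words mw il := by
  intro words mw il hpre hD
  obtain ⟨hil, hlen2, hmw, hndvd⟩ := hD
  subst hil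
  have h1 : ¬ words.length = 1 := by omega
  have hbeq : (words.length == 1) = false := by simp [h1]
  simp only [justifyLine, justifyLine_alt, if_neg h1, hbeq, Bool.false_or,
    Bool.false_eq_true, if_neg (not_false)]
  have hsum : words.foldl (fun a w => a + PySem.Str.len w) 0 = (words.map PySem.Str.len).sum := by
    simpa using PySem.List.foldl_add words PySem.Str.len 0
  rw [hsum]
  set gN : Nat := words.length - 1 with hgN
  have hg : 0 < gN := by omega
  have hgI : ((words.length : Int) - 1) = (gN : Int) := by rw [hgN]; omega
  set total : Int := mw - (words.map PySem.Str.len).sum with htdef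
  set q : Int := PySem.Int.floordiv total ((words.length : Int) - 1) with hqdef
  set r : Int := PySem.Int.mod total ((words.length : Int) - 1) with hrdef
  have hws := pvSumLen words
  have hneg : total < 0 := by omega
  have hr := pvMod_bounds total ((words.length : Int) - 1) (by omega)
  have hrpos : 0 < r := by
    rcases lt_or_eq_of_le hr.1 with h | h
    · exact h
    · exfalso
      apply hndvd
      have hmod0 : PySem.Int.mod total ((words.length : Int) - 1) = 0 := by
        rw [← hrdef]; omega
      have hdvd := (PySem.Int.mod_eq_zero_iff_dvd total ((words.length : Int) - 1)).mp hmod0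
      have h6 : words.foldr (fun w n => n + (w.toList.length : Int)) 0 - mw = - total := by
        rw [hws, htdef]; ring
      rw [h6]
      exact hdvd.neg_right
  have hq0 : q.toNat = 0 := by
    have : q < 0 := by
      rw [hqdef]
      exact (PySem.Int.floordiv_lt_iff_lt_mul (by omega)).mpr (by omega)
    omega
  -- B's loop body is empty: the distributed padding is zero
  have hrange : PySem.List.pyRange 0 total 1 = PySem.List.pyRange 0 ((0 : Nat) : Int) 1 := by
    rw [PySem.List.pyRange_one_eq_nil (by omega), PySem.List.pyRange_one_eq_nil (by omega)]
  rw [hrange, hgI, pvRR gN hg 0 (words.map String.toList) (by simp; omega)]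
  have hB : List.mapIdx (fun j l => l ++ List.replicate (pvCnt gN 0 j) ' ')
      (words.map String.toList) = words.map String.toList := by
    apply List.ext_getElem (by simp)
    intro i hh1 hh2
    simp [pvCnt]
  rw [hB]
  -- A's fold as a flatMap
  have hA : (PySem.List.enumerate (PySem.List.slice words none (some (-1))) 0).foldl
      (fun line iw =>
        let line := line ++ iw.2.toList ++ List.replicate q.toNat ' '
        if iw.1 < r then line ++ [' '] else line) ([] : List Char)
      = (PySem.List.enumerate words.dropLast 0).flatMap
          (fun iw => iw.2.toList ++ (List.replicate q.toNat ' ' ++ (if iw.1 < r then [' '] else []))) := by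
    rw [PySem.List.slice_to_neg_one]
    rw [PySem.List.foldl_congr_mem _ _
      (fun line iw => line ++ (iw.2.toList ++ (List.replicate q.toNat ' ' ++ (if iw.1 < r then [' '] else [])))) _
      (by intro acc x _; dsimp only; split_ifs <;> simp)]
    simpa using PySem.List.foldl_append_eq_flatMap
      (fun iw : Int × String => iw.2.toList ++ (List.replicate q.toNat ' ' ++ (if iw.1 < r then [' '] else []))) _ []
  rw [hA]
  -- compare lengths: A carries at least one stray space in the first gap
  intro heq
  have hlists := congrArg String.toList heq
  simp only [String.toList_ofList] at hlists
  have hlen := congrArg List.length hlists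
  simp only [List.length_append] at hlen
  rw [pvFlatLen (fun i => List.replicate q.toNat ' ' ++ (if i < r then [' '] else []))
    words.dropLast 0] at hlen
  have hsplit : words = words.dropLast ++ [words.getLast hpre] :=
    (List.dropLast_append_getLast hpre).symm
  have hBlen : ((words.map String.toList).flatten).length
      = ((words.dropLast.map String.toList).flatten).length + (words.getLast hpre).toList.length := by
    conv_lhs => rw [hsplit]
    simp
  rw [hBlen] at hlen
  -- the padding-length sum is at least 1 (index 0 gets the extra space)
  obtain ⟨w0, rest, hdl⟩ : ∃ w0 rest, words.dropLast = w0 :: rest := by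
    rcases hdl : words.dropLast with _ | ⟨w0, rest⟩
    · exfalso
      have := congrArg List.length hdl
      simp at this
      omega
    · exact ⟨w0, rest, rfl⟩
  have hsum1 : 1 ≤ ((PySem.List.enumerate words.dropLast 0).map
      (fun iw => (List.replicate q.toNat ' ' ++ (if iw.1 < r then [' '] else [])).length)).sum := by
    rw [hdl]
    simp only [PySem.List.enumerate_cons, List.map_cons, List.sum_cons]
    have h01 : ((0 : Int) < r) := hrpos
    rw [if_pos h01]
    have hnn : 0 ≤ ((PySem.List.enumerate rest (0 + 1)).map
        (fun iw => (List.replicate q.toNat ' ' ++ (if iw.1 < r then [' '] else [])).length)).sum :=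
      List.sum_nonneg (by intro x hx; positivity)
    simp [hq0]
  have hlast : ((PySem.List.pyGet? words (-1)).getD "").toList.length
      = (words.getLast hpre).toList.length := by
    rw [pvGet_neg_one, List.getLast?_eq_some_getLast hpre]
    rfl
  rw [hlast] at hlen
  omega

-- ===== VERDICT (by name: the statement is the Claim_ definition above) =====
theorem justifyLine_spec : Claim_unchanged_justifyLine := by
  intro words mw il _ hpre
  unfold Spec_justifyLine
  intro hD
  exact pvMain words mw il hpre hD

theorem justifyLine_changed : Claim_changed_justifyLine := by
  unfold Claim_changed_justifyLine; decide

theorem justifyLine_tight : Claim_exact_justifyLine := by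
  intro words mw il _ hpre hD
  exact pvTight words mw il hpre hD
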